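-- pv_equiv track=rewrite | github.com/dominikjalowiecki/Programming-Projects | python/ex_signals/skrypt.py | podaj_slowa_ktorych_litery_oddalone_sa_co_najwyzej_o_10
-- ===== SOURCE A (Python) =====
-- def podaj_slowa_ktorych_litery_oddalone_sa_co_najwyzej_o_10(sygnaly):
--     slowa = []
--     czy_slowo_jest_prawidlowe = True
--     for sygnal in sygnaly:
--         litery = list(set(sygnal))
--
--         for i in range(len(litery)):
--             for j in range(i+1, len(litery)):
--                 if abs(ord(litery[i])-ord(litery[j])) > 10:
--                     czy_slowo_jest_prawidlowe = False
--
--                 if not czy_slowo_jest_prawidlowe: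
--                     break
--
--             if not czy_slowo_jest_prawidlowe:
--                 break
--
--         if czy_slowo_jest_prawidlowe:
--             slowa.append(sygnal)
--
--         czy_slowo_jest_prawidlowe = True
--
--     return slowa
-- ===== SOURCE B (Python) =====
-- def podaj_slowa_ktorych_litery_oddalone_sa_co_najwyzej_o_10(sygnaly):
--     slowa = []
--     for sygnal in sygnaly:
--         kolejne = sorted(sygnal)
--         if not kolejne or ord(kolejne[-1]) - ord(kolejne[0]) <= 10:
--             slowa.append(sygnal)
--     return slowa
-- ===== Notes on version B (the rewrite author's own statement) =====
-- stated objective: faster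
-- what changed: Replaces A's dedup plus nested all-pairs index scan with break flags by sorting each word's characters once and comparing only the first and last code points.
import Mathlib
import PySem

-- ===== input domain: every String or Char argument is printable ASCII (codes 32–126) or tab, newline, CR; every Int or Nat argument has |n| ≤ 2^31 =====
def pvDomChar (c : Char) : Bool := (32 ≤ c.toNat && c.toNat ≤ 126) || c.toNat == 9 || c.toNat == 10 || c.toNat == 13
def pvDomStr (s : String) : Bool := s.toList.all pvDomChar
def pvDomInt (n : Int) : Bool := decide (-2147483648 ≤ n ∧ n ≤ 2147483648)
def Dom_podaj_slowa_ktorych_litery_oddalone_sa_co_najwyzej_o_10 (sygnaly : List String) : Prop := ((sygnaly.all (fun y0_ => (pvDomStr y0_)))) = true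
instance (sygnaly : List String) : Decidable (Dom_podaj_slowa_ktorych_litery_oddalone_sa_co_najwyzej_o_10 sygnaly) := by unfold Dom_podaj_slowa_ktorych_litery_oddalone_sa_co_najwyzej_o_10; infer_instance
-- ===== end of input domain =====

-- B sorts each word's characters once and compares only the extreme code points,
-- replacing A's dedup + nested all-pairs scan; equal return values, no side effects.

-- ===== PORT A =====
-- inner 'for j in range(i+1, len(litery))' loop with its break; returns the flag
def pvInnerA (litery : List Char) (i j : Nat) : Bool :=
  if j < litery.length then
    if ((litery[i]!.toNat : Int) - (litery[j]!.toNat : Int)).natAbs > 10 then false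
    else pvInnerA litery i (j+1)
  else true
termination_by litery.length - j

-- outer 'for i in range(len(litery))' loop with its break; returns the flag
def pvOuterA (litery : List Char) (i : Nat) : Bool :=
  if i < litery.length then
    if pvInnerA litery i (i+1) then pvOuterA litery (i+1) else false
  else true
termination_by litery.length - i

def podaj_slowa_ktorych_litery_oddalone_sa_co_najwyzej_o_10 (sygnaly : List String) : List String :=
  sygnaly.foldl (fun slowa sygnal =>
    let litery := PySem.Set.ofList sygnal.toList   -- list(set(sygnal)); membership-only use, order irrelevant
    if pvOuterA litery 0 then slowa ++ [sygnal] else slowa) []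

-- ===== PORT B =====
def podaj_slowa_ktorych_litery_oddalone_sa_co_najwyzej_o_10_alt (sygnaly : List String) : List String :=
  sygnaly.foldl (fun slowa sygnal =>
    let kolejne := PySem.List.sorted sygnal.toList (fun c => c) false
    if kolejne.isEmpty then slowa ++ [sygnal]
    else if (kolejne.getLast!.toNat : Int) - (kolejne.head!.toNat : Int) <= 10 then slowa ++ [sygnal]
    else slowa) []

-- ===== PRECONDITION & SPEC =====
def Spec_podaj_slowa_ktorych_litery_oddalone_sa_co_najwyzej_o_10 (sygnaly : List String) (out : List String) : Prop := out = podaj_slowa_ktorych_litery_oddalone_sa_co_najwyzej_o_10_alt sygnaly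
instance (sygnaly : List String) (out : List String) : Decidable (Spec_podaj_slowa_ktorych_litery_oddalone_sa_co_najwyzej_o_10 sygnaly out) := by unfold Spec_podaj_slowa_ktorych_litery_oddalone_sa_co_najwyzej_o_10; infer_instance

-- ===== CLAIM (what is proved, stated in full; the proofs are below) =====
def Claim_equal_podaj_slowa_ktorych_litery_oddalone_sa_co_najwyzej_o_10 : Prop := ∀ (sygnaly : List String), Dom_podaj_slowa_ktorych_litery_oddalone_sa_co_najwyzej_o_10 sygnaly → Spec_podaj_slowa_ktorych_litery_oddalone_sa_co_najwyzej_o_10 sygnaly (podaj_slowa_ktorych_litery_oddalone_sa_co_najwyzej_o_10 sygnaly)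

-- ===== LEMMAS AND PROOFS =====

def Within (l : List Char) : Prop :=
  ∀ x ∈ l, ∀ y ∈ l, (x.toNat : Int) - (y.toNat : Int) ≤ 10

lemma innerA_spec (lit : List Char) (i j : Nat) :
    pvInnerA lit i j = true ↔
      ∀ b, j ≤ b → b < lit.length → ((lit[i]!.toNat : Int) - (lit[b]!.toNat : Int)).natAbs ≤ 10 := by
  fun_induction pvInnerA lit i j with
  | case1 j hj hbig =>
    simp only [Bool.false_eq_true, false_iff]; push_neg
    exact ⟨j, le_refl j, hj, by omega⟩
  | case2 j hj hok ih =>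
    rw [ih]; constructor
    · intro h b hb hlt
      rcases Nat.eq_or_lt_of_le hb with rfl | h2
      · omega
      · exact h b h2 hlt
    · intro h b hb hlt; exact h b (by omega) hlt
  | case3 j hj =>
    constructor
    · intro _ b hb hlt; omega
    · intro _; rfl

lemma outerA_spec (lit : List Char) (i : Nat) :
    pvOuterA lit i = true ↔
      ∀ a b, i ≤ a → a < b → b < lit.length →
        ((lit[a]!.toNat : Int) - (lit[b]!.toNat : Int)).natAbs ≤ 10 := by
  fun_induction pvOuterA lit i with
  | case1 i hi hin ih =>
    rw [ih]; rw [innerA_spec] at hin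
    constructor
    · intro h a b ha hab hb
      rcases Nat.eq_or_lt_of_le ha with rfl | h2
      · exact hin b (by omega) hb
      · exact h a b h2 hab hb
    · intro h a b ha hab hb; exact h a b (by omega) hab hb
  | case2 i hi hin =>
    simp only [Bool.false_eq_true, false_iff]; rw [innerA_spec] at hin
    push_neg at hin; obtain ⟨b, hb1, hb2, hb3⟩ := hin
    intro h; exact absurd (h i b le_rfl (by omega) hb2) (by omega)
  | case3 i hi =>
    constructor
    · intro _ a b ha hab hb; omega
    · intro _; rfl

lemma outerA_within (lit : List Char) : pvOuterA lit 0 = true ↔ Within lit := by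
  rw [outerA_spec]
  constructor
  · intro h x hx y hy
    obtain ⟨a, ha, rfl⟩ := List.mem_iff_getElem.mp hx
    obtain ⟨b, hb, rfl⟩ := List.mem_iff_getElem.mp hy
    rcases lt_trichotomy a b with hab | rfl | hab
    · have := h a b (by omega) hab hb
      rw [getElem!_pos lit a ha, getElem!_pos lit b hb] at this; omega
    · omega
    · have := h b a (by omega) hab ha
      rw [getElem!_pos lit a ha, getElem!_pos lit b hb] at this; omega
  · intro h a b _ hab hb
    have ha : a < lit.length := by omega
    rw [getElem!_pos lit a ha, getElem!_pos lit b hb]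
    have h1 := h lit[a] (lit.getElem_mem ha) lit[b] (lit.getElem_mem hb)
    have h2 := h lit[b] (lit.getElem_mem hb) lit[a] (lit.getElem_mem ha)
    omega

lemma condB_within (l : List Char) :
    ((PySem.List.sorted l (fun c => c) false).isEmpty ||
      decide (((PySem.List.sorted l (fun c => c) false).getLast!.toNat : Int) -
              ((PySem.List.sorted l (fun c => c) false).head!.toNat : Int) ≤ 10)) = true ↔ Within l := by
  set k := PySem.List.sorted l (fun c => c) false with hkdef
  have hkl : ∀ x, x ∈ k ↔ x ∈ l := fun x => PySem.List.mem_sorted l (fun c => c) false x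
  have hlen : k.length = l.length := PySem.List.length_sorted l (fun c => c) false
  have mono : ∀ p q (hpq : p ≤ q) (hq : q < k.length), k[p]'(by omega) ≤ k[q]'hq := by
    intro p q hpq hq
    have hq2 : q < (PySem.List.sorted l (fun x => x)).length := by rw [hkdef] at hq; exact hq
    have h3 := PySem.List.sorted_id_getElem_mono l hpq hq2
    simpa [← hkdef] using h3
  by_cases hl : l = []
  · have : k = [] := by
      rw [hkdef]; exact (PySem.List.sorted_eq_nil_iff _ _ _).mpr hl
    simp [this, hl, Within]
  · have hk : k ≠ [] := by
      rw [hkdef, Ne, PySem.List.sorted_eq_nil_iff]; exact hl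
    rw [List.isEmpty_eq_false_iff.mpr hk]
    simp only [Bool.false_or, decide_eq_true_eq]
    rw [List.getLast!_eq_getLast?_getD, List.getLast?_eq_some_getLast hk,
        List.head!_eq_head?_getD, List.head?_eq_some_head hk]
    simp only [Option.getD_some]
    have hkpos : 0 < k.length := List.length_pos_iff.mpr hk
    constructor
    · intro h x hx y hy
      obtain ⟨ix, hix, hxe⟩ := List.mem_iff_getElem.mp ((hkl x).mpr hx)
      obtain ⟨iy, hiy, hye⟩ := List.mem_iff_getElem.mp ((hkl y).mpr hy)
      have hxle : x ≤ k.getLast hk := by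
        rw [List.getLast_eq_getElem, ← hxe]
        exact mono ix (k.length - 1) (by omega) (by omega)
      have hyge : k.head hk ≤ y := by
        rw [List.head_eq_getElem, ← hye]
        exact mono 0 iy (by omega) hiy
      have e1 : x.toNat ≤ (k.getLast hk).toNat := hxle
      have e2 : (k.head hk).toNat ≤ y.toNat := hyge
      omega
    · intro h
      exact h (k.getLast hk) ((hkl _).mp (List.getLast_mem hk))
              (k.head hk) ((hkl _).mp (List.head_mem hk))

lemma cond_eq (s : String) :
    pvOuterA (PySem.Set.ofList s.toList) 0 =
      ((PySem.List.sorted s.toList (fun c => c) false).isEmpty ||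
        decide (((PySem.List.sorted s.toList (fun c => c) false).getLast!.toNat : Int) -
                ((PySem.List.sorted s.toList (fun c => c) false).head!.toNat : Int) ≤ 10)) := by
  rw [Bool.eq_iff_iff, outerA_within, condB_within]
  constructor
  · intro h x hx y hy
    exact h x ((PySem.Set.mem_ofList _ _).mpr hx) y ((PySem.Set.mem_ofList _ _).mpr hy)
  · intro h x hx y hy
    exact h x ((PySem.Set.mem_ofList _ _).mp hx) y ((PySem.Set.mem_ofList _ _).mp hy)

lemma ports_eq (sygnaly : List String) : podaj_slowa_ktorych_litery_oddalone_sa_co_najwyzej_o_10 sygnaly = podaj_slowa_ktorych_litery_oddalone_sa_co_najwyzej_o_10_alt sygnaly := by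
  unfold podaj_slowa_ktorych_litery_oddalone_sa_co_najwyzej_o_10 podaj_slowa_ktorych_litery_oddalone_sa_co_najwyzej_o_10_alt
  congr 1
  funext slowa sygnal
  show (if pvOuterA (PySem.Set.ofList sygnal.toList) 0 then slowa ++ [sygnal] else slowa) = _
  rw [cond_eq]
  by_cases hE : (PySem.List.sorted sygnal.toList (fun c => c) false).isEmpty <;>
    by_cases hC : (((PySem.List.sorted sygnal.toList (fun c => c) false).getLast!.toNat : Int) -
                ((PySem.List.sorted sygnal.toList (fun c => c) false).head!.toNat : Int) ≤ 10) <;>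
    simp only [hE, hC, decide_true, decide_false, Bool.true_or, Bool.false_or,
      Bool.or_self, if_true, if_false, ite_true, ite_false,
      Bool.false_eq_true, Bool.true_eq_false, eq_self_iff_true]

-- ===== VERDICT (by name: the statement is the Claim_ definition above) =====
theorem podaj_slowa_ktorych_litery_oddalone_sa_co_najwyzej_o_10_spec : Claim_equal_podaj_slowa_ktorych_litery_oddalone_sa_co_najwyzej_o_10 := by
  intro sygnaly _
  unfold Spec_podaj_slowa_ktorych_litery_oddalone_sa_co_najwyzej_o_10
  exact ports_eq sygnaly
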